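-- pv_equiv track=rewrite | github.com/xdm2211/iceweasel | testing/mozbase/manifestparser/manifestparser/token.py | strip_unquoted
-- ===== SOURCE A (Python) =====
-- def strip_unquoted(s: str) -> str:
--     """
--     Remove leading and trailing spaces
--     Collapse multiple spaces to one inside the string
--     Except do not alter quoted parts
--     """
--     result = ""
--     quoting: bool = False
--     prev: str = ""
--     for ch in s.strip():
--         if quoting:
--             if ch in ['"', "'"]:
--                 quoting = False
--         elif ch in ['"', "'"]:
--             quoting = True
--         if quoting or ch != " " or prev != " ":
--             result += ch
--         prev = ch
--     return result
-- ===== SOURCE B (Python) =====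
-- def strip_unquoted(s: str) -> str:
--     """Same result as A, but by splitting on quote characters and
--     collapsing space runs per unquoted segment (built back-to-front)."""
--
--     def collapse(seg: str) -> str:
--         kept = []  # collapsed segment, in reverse order; kept[-1] = next kept char
--         for ch in reversed(seg):
--             if ch == " " and kept and kept[-1] == " ":
--                 continue
--             kept.append(ch)
--         return "".join(reversed(kept))
--
--     t = s.strip()
--     pieces = []
--     quoting = False
--     i = 0
--     n = len(t)
--     while i < n:
--         j = i
--         while j < n and t[j] not in "\"'":
--             j += 1
--         seg = t[i:j]
--         pieces.append(seg if quoting else collapse(seg))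
--         if j < n:
--             pieces.append(t[j])
--             quoting = not quoting
--             j += 1
--         i = j
--     return "".join(pieces)
-- ===== Notes on version B (the rewrite author's own statement) =====
-- stated objective: alternative
-- what changed: Replaces A's single-pass state machine (quoting flag + prev-char tracking per character) by splitting the stripped string at quote characters and collapsing space runs independently inside each unquoted segment, leaving quoted segments verbatim.
import Mathlib
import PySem

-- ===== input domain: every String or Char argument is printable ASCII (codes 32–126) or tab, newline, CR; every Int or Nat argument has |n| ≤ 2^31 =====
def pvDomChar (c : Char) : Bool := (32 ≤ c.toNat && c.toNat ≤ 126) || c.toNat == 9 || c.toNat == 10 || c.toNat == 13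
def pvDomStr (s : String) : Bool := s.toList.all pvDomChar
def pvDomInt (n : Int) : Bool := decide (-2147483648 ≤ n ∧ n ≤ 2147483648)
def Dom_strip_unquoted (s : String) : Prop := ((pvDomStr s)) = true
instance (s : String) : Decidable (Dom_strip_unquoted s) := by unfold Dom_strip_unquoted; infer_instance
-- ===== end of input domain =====

-- B is an alternative decomposition of the same O(n) task: split at quote chars, collapse
-- spaces per unquoted segment; A is a single-pass state machine. Same result, no speed claim.

-- ===== PORT A =====
-- state = (result, quoting, prev); prev is the Python string prev ("" or one char) as List Char
def stepA (st : List Char × Bool × List Char) (ch : Char) : List Char × Bool × List Char :=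
  let quoting := st.2.1
  let quoting' :=
    if quoting then (if ch = '"' ∨ ch = '\'' then false else true)
    else (if ch = '"' ∨ ch = '\'' then true else false)
  let result' := if quoting' ∨ ch ≠ ' ' ∨ st.2.2 ≠ [' '] then st.1 ++ [ch] else st.1
  (result', quoting', [ch])

def strip_unquoted (s : String) : String :=
  String.ofList ((PySem.Str.strip s).toList.foldl stepA ([], false, [])).1

-- ===== PORT B =====
def isQuote (c : Char) : Bool := c = '"' || c = '\''

-- B's collapse helper: scan the segment back-to-front, dropping a space whose
-- already-kept right neighbour is a space ('kept' is held newest-first, so it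
-- is the collapsed suffix itself and kept[-1] is its head)
def collapseB (seg : List Char) : List Char :=
  seg.reverse.foldl
    (fun kept ch => if ch = ' ' ∧ kept.head? = some ' ' then kept else ch :: kept) []

-- B's outer while-loop: scan to the next quote char, collapse the unquoted segment, toggle
def splitB (t : List Char) (quoting : Bool) : List Char :=
  let seg := t.takeWhile (fun c => !isQuote c)
  let seg' := if quoting then seg else collapseB seg
  match h : t.dropWhile (fun c => !isQuote c) with
  | [] => seg'
  | q :: rest' => seg' ++ q :: splitB rest' (!quoting)
termination_by t.length
decreasing_by
  have h1 : (t.dropWhile (fun c => !isQuote c)).length ≤ t.length :=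
    List.length_dropWhile_le _ _
  rw [h] at h1; simp at h1; omega

def strip_unquoted_alt (s : String) : String :=
  String.ofList (splitB (PySem.Str.strip s).toList false)

-- ===== PRECONDITION & SPEC =====
def Spec_strip_unquoted (s : String) (out : String) : Prop := out = strip_unquoted_alt s
instance (s : String) (out : String) : Decidable (Spec_strip_unquoted s out) := by unfold Spec_strip_unquoted; infer_instance

-- ===== CLAIM (what is proved, stated in full; the proofs are below) =====
def Claim_equal_strip_unquoted : Prop := ∀ (s : String), Dom_strip_unquoted s → Spec_strip_unquoted s (strip_unquoted s)

-- ===== LEMMAS AND PROOFS =====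

-- one step of A on a non-quote character, quoting off
theorem stepA_false_noquote (res p : List Char) (c : Char) (hc : ¬ (c = '"' ∨ c = '\'')) :
    stepA (res, false, p) c
      = ((if c ≠ ' ' ∨ p ≠ [' '] then res ++ [c] else res), false, [c]) := by
  simp [stepA, hc]

-- one step of A on a non-quote character, quoting on: kept verbatim
theorem stepA_true_noquote (res p : List Char) (c : Char) (hc : ¬ (c = '"' ∨ c = '\'')) :
    stepA (res, true, p) c = (res ++ [c], true, [c]) := by
  simp [stepA, hc]

-- one step of A on a quote character: kept, quoting toggles
theorem stepA_false_quote (res p : List Char) (c : Char) (hc : c = '"' ∨ c = '\'') :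
    stepA (res, false, p) c = (res ++ [c], true, [c]) := by
  simp [stepA, hc]

theorem stepA_true_quote (res p : List Char) (c : Char) (hc : c = '"' ∨ c = '\'') :
    stepA (res, true, p) c = (res ++ [c], false, [c]) := by
  have hne : c ≠ ' ' := by rcases hc with h | h <;> subst h <;> decide
  simp [stepA, hc, hne]

-- structural-recursion view of collapseB (the reversed foldl is a foldr)
def collapseR : List Char → List Char
  | [] => []
  | c :: u =>
      if c = ' ' ∧ (collapseR u).head? = some ' ' then collapseR u
      else c :: collapseR u

theorem collapseB_eq_collapseR : ∀ (u : List Char), collapseB u = collapseR u := by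
  intro u
  unfold collapseB
  rw [List.foldl_reverse]
  induction u with
  | nil => rfl
  | cons c u ih => rw [List.foldr_cons, ih]; rfl

theorem collapseR_head? : ∀ (u : List Char), (collapseR u).head? = u.head? := by
  intro u
  induction u with
  | nil => rfl
  | cons c u ih =>
    by_cases h : c = ' ' ∧ (collapseR u).head? = some ' '
    · rw [show collapseR (c :: u) = collapseR u from by rw [collapseR, if_pos h]]
      rw [ih] at h ⊢
      rw [h.2, ← h.1]
      rfl
    · rw [show collapseR (c :: u) = c :: collapseR u from by rw [collapseR, if_neg h]]
      rfl

theorem collapseR_cons_ne {c : Char} (u : List Char) (hc : c ≠ ' ') :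
    collapseR (c :: u) = c :: collapseR u := by
  rw [collapseR, if_neg (by simp [hc])]

theorem collapseR_space_space (u : List Char) :
    collapseR (' ' :: ' ' :: u) = collapseR (' ' :: u) := by
  rw [collapseR, if_pos (by rw [collapseR_head?]; simp)]

theorem collapseR_space_ne {c : Char} (u : List Char) (hc : c ≠ ' ') :
    collapseR (' ' :: c :: u) = ' ' :: collapseR (c :: u) := by
  rw [collapseR, if_neg (by rw [collapseR_head?]; simp [hc])]

-- A's "kept characters" over a quote-free run, as a function of prev
def keptA (prev : List Char) : List Char → List Char
  | [] => []
  | c :: u => if c = ' ' ∧ prev = [' '] then keptA [' '] u else c :: keptA [c] u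

theorem keptA_eq_collapseR :
    ∀ (u : List Char),
      (∀ p : List Char, p ≠ [' '] → keptA p u = collapseR u) ∧
      (' ' :: keptA [' '] u = collapseR (' ' :: u)) := by
  intro u
  induction u with
  | nil =>
    exact ⟨fun p hp => by simp [keptA, collapseR], by simp [keptA, collapseR]⟩
  | cons c u ih =>
    refine ⟨?_, ?_⟩
    · intro p hp
      by_cases hc : c = ' '
      · subst hc
        have l : keptA p (' ' :: u) = ' ' :: keptA [' '] u := by simp [keptA, hp]
        rw [l, ih.2]
      · have l : keptA p (c :: u) = c :: keptA [c] u := by simp [keptA, hc]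
        rw [l, collapseR_cons_ne u hc, ih.1 [c] (by simp [hc])]
    · by_cases hc : c = ' '
      · subst hc
        have l : keptA [' '] (' ' :: u) = keptA [' '] u := by simp [keptA]
        rw [l, collapseR_space_space u]; exact ih.2
      · have l : keptA [' '] (c :: u) = c :: keptA [c] u := by simp [keptA, hc]
        rw [l, collapseR_space_ne u hc, collapseR_cons_ne u hc,
          ih.1 [c] (by simp [hc])]

def lastPrev (prev : List Char) : List Char → List Char
  | [] => prev
  | c :: u => lastPrev [c] u

theorem not_quote_of_isQuote_false {c : Char} (h : isQuote c = false) :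
    ¬ (c = '"' ∨ c = '\'') := by
  simp [isQuote] at h; simp [h]

-- running A over a quote-free run: quoting stays false, output is keptA
theorem foldl_stepA_noquote_false :
    ∀ (u : List Char), (∀ c ∈ u, isQuote c = false) →
      ∀ (res p : List Char),
        u.foldl stepA (res, false, p) = (res ++ keptA p u, false, lastPrev p u) := by
  intro u
  induction u with
  | nil => intro _ res p; simp [keptA, lastPrev]
  | cons c u ih =>
    intro hq res p
    have hcne := not_quote_of_isQuote_false (hq c List.mem_cons_self)
    rw [List.foldl_cons, stepA_false_noquote res p c hcne,
      ih (fun x hx => hq x (List.mem_cons_of_mem _ hx))]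
    by_cases hk : c = ' ' ∧ p = [' ']
    · rw [if_neg (by simp [hk.1, hk.2])]
      simp [keptA, lastPrev, hk.1, hk.2]
    · rw [if_pos (by tauto)]
      simp only [keptA, lastPrev, if_neg hk]
      simp

-- running A over a quote-free run while quoting: everything kept verbatim
theorem foldl_stepA_noquote_true :
    ∀ (u : List Char), (∀ c ∈ u, isQuote c = false) →
      ∀ (res p : List Char),
        u.foldl stepA (res, true, p) = (res ++ u, true, lastPrev p u) := by
  intro u
  induction u with
  | nil => intro _ res p; simp [lastPrev]
  | cons c u ih =>
    intro hq res p
    have hcne := not_quote_of_isQuote_false (hq c List.mem_cons_self)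
    rw [List.foldl_cons, stepA_true_noquote res p c hcne,
      ih (fun x hx => hq x (List.mem_cons_of_mem _ hx))]
    simp [lastPrev]

-- head of a non-empty dropWhile fails the predicate
theorem dropWhile_cons_pred_false {p : Char → Bool} :
    ∀ (t : List Char) (q : Char) (rest : List Char),
      t.dropWhile p = q :: rest → p q = false := by
  intro t
  induction t with
  | nil => intro q rest h; simp [List.dropWhile] at h
  | cons c t ih =>
    intro q rest h
    rw [List.dropWhile_cons] at h
    by_cases hc : p c = true
    · rw [if_pos hc] at h; exact ih q rest h
    · rw [if_neg hc] at h
      cases h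
      simpa using hc

-- unfolding splitB once, by the shape of the dropWhile part
theorem splitB_of_drop_nil {t : List Char} {quoting : Bool}
    (h : t.dropWhile (fun c => !isQuote c) = []) :
    splitB t quoting
      = (if quoting then t.takeWhile (fun c => !isQuote c)
         else collapseB (t.takeWhile (fun c => !isQuote c))) := by
  rw [splitB]
  split
  · rfl
  · next q rest heq => rw [h] at heq; cases heq

theorem splitB_of_drop_cons {t : List Char} {quoting : Bool} {q : Char} {rest : List Char}
    (h : t.dropWhile (fun c => !isQuote c) = q :: rest) :
    splitB t quoting
      = (if quoting then t.takeWhile (fun c => !isQuote c)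
         else collapseB (t.takeWhile (fun c => !isQuote c))) ++ q :: splitB rest (!quoting) := by
  rw [splitB]
  split
  · next heq => rw [h] at heq; cases heq
  · next q' rest' heq =>
    rw [h] at heq
    cases heq
    rfl

-- the main correspondence, by strong induction on the length of t
theorem foldl_stepA_eq_splitB :
    ∀ (n : Nat) (t : List Char), t.length ≤ n →
      (∀ (res p : List Char), p ≠ [' '] →
          (t.foldl stepA (res, false, p)).1 = res ++ splitB t false) ∧
      (∀ (res p : List Char),
          (t.foldl stepA (res, true, p)).1 = res ++ splitB t true) := by
  intro n
  induction n with
  | zero =>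
    intro t ht
    have : t = [] := List.eq_nil_of_length_eq_zero (Nat.le_zero.mp ht)
    subst this
    constructor
    · intro res p _
      rw [splitB_of_drop_nil (by simp)]
      simp [collapseB_eq_collapseR, collapseR]
    · intro res p
      rw [splitB_of_drop_nil (by simp)]
      simp
  | succ n ih =>
    intro t ht
    have hsplit := List.takeWhile_append_dropWhile (p := fun c => !isQuote c) (l := t)
    set seg := t.takeWhile (fun c => !isQuote c) with hseg
    have hsegq : ∀ c ∈ seg, isQuote c = false := by
      intro c hc
      have := List.mem_takeWhile_imp hc
      simpa using this
    constructor
    · intro res p hp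
      cases hdrop : t.dropWhile (fun c => !isQuote c) with
      | nil =>
        rw [splitB_of_drop_nil hdrop]
        conv_lhs => rw [← hsplit]
        rw [List.foldl_append, foldl_stepA_noquote_false seg hsegq res p,
          (keptA_eq_collapseR seg).1 p hp, ← collapseB_eq_collapseR, hdrop]
        simp [← hseg]
      | cons q rest' =>
        have hq : q = '"' ∨ q = '\'' := by
          have h0 := dropWhile_cons_pred_false t q rest' hdrop
          simp [isQuote] at h0
          tauto
        have hlen : rest'.length ≤ n := by
          have h1 : (t.dropWhile (fun c => !isQuote c)).length ≤ t.length :=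
            List.length_dropWhile_le _ _
          rw [hdrop] at h1; simp at h1; omega
        rw [splitB_of_drop_cons hdrop]
        conv_lhs => rw [← hsplit]
        rw [List.foldl_append, foldl_stepA_noquote_false seg hsegq res p,
          (keptA_eq_collapseR seg).1 p hp, ← collapseB_eq_collapseR, hdrop, List.foldl_cons,
          stepA_false_quote _ _ q hq,
          (ih rest' hlen).2 (res ++ collapseB seg ++ [q]) [q]]
        simp [← hseg]
    · intro res p
      cases hdrop : t.dropWhile (fun c => !isQuote c) with
      | nil =>
        rw [splitB_of_drop_nil hdrop]
        conv_lhs => rw [← hsplit]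
        rw [List.foldl_append, foldl_stepA_noquote_true seg hsegq res p, hdrop]
        simp [← hseg]
      | cons q rest' =>
        have hq : q = '"' ∨ q = '\'' := by
          have h0 := dropWhile_cons_pred_false t q rest' hdrop
          simp [isQuote] at h0
          tauto
        have hlen : rest'.length ≤ n := by
          have h1 : (t.dropWhile (fun c => !isQuote c)).length ≤ t.length :=
            List.length_dropWhile_le _ _
          rw [hdrop] at h1; simp at h1; omega
        rw [splitB_of_drop_cons hdrop]
        conv_lhs => rw [← hsplit]
        rw [List.foldl_append, foldl_stepA_noquote_true seg hsegq res p, hdrop,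
          List.foldl_cons, stepA_true_quote _ _ q hq,
          (ih rest' hlen).1 (res ++ seg ++ [q]) [q]
            (by rcases hq with h | h <;> subst h <;> decide)]
        simp [← hseg]

-- ===== VERDICT (by name: the statement is the Claim_ definition above) =====
theorem strip_unquoted_spec : Claim_equal_strip_unquoted := by
  intro s _
  unfold Spec_strip_unquoted strip_unquoted strip_unquoted_alt
  congr 1
  have h := (foldl_stepA_eq_splitB (PySem.Str.strip s).toList.length
    (PySem.Str.strip s).toList (le_refl _)).1 [] [] (by simp)
  simpa using h
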